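-- pv_equiv track=rewrite | github.com/Diveyam-Mishra/BlockChain_Compile | PoC/compliledger/backend/app/services/ai_service.py | _generate_contract_recommendations
-- ===== SOURCE A (Python) =====
-- from typing import Dict, Any, List, Optional
--
-- def _generate_contract_recommendations(control_mappings: List[Dict[str, Any]], contract_code: str) -> List[Dict[str, Any]]:
--     """Generate recommendations based on mapped controls and contract code"""
--     recommendations = []
--
--     # Check for high priority control families
--     has_supply_chain = any(cm["control_id"].startswith("sr-") for cm in control_mappings)
--     has_crypto = any(cm["control_id"].startswith("sc-") for cm in control_mappings)
--     has_integrity = any(cm["control_id"].startswith("si-") for cm in control_mappings)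
--     has_access_control = any(cm["control_id"].startswith("ac-") for cm in control_mappings)
--
--     # Add recommendations based on identified control families
--     if has_supply_chain:
--         recommendations.append({
--             "category": "Supply Chain Security",
--             "description": "Implement supply chain integrity verification in the smart contract",
--             "importance": "high"
--         })
--
--     if has_crypto:
--         recommendations.append({
--             "category": "Cryptographic Controls",
--             "description": "Ensure cryptographic mechanisms are properly implemented and validated",
--             "importance": "high"
--         })
--
--     if has_integrity:
--         recommendations.append({
--             "category": "Data Integrity",
--             "description": "Implement additional integrity checks for on-chain data",
--             "importance": "high"
--         })
--
--     if has_access_control: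
--         recommendations.append({
--             "category": "Access Management",
--             "description": "Review and strengthen access control mechanisms in the contract",
--             "importance": "medium"
--         })
--
--     # Default recommendations if none were generated
--     if not recommendations:
--         recommendations.append({
--             "category": "General Security",
--             "description": "Conduct comprehensive security review of the smart contract",
--             "importance": "medium"
--         })
--
--     return recommendations
-- ===== SOURCE B (Python) =====
-- def _generate_contract_recommendations(control_mappings, contract_code):
--     """Table-driven re-implementation: one pass over the mappings collects the
--     matched control-family prefixes into a set, then the recommendation table is
--     emitted in order; a default is appended when nothing matched."""
--     table = [
--         ("sr-", {
--             "category": "Supply Chain Security",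
--             "description": "Implement supply chain integrity verification in the smart contract",
--             "importance": "high"
--         }),
--         ("sc-", {
--             "category": "Cryptographic Controls",
--             "description": "Ensure cryptographic mechanisms are properly implemented and validated",
--             "importance": "high"
--         }),
--         ("si-", {
--             "category": "Data Integrity",
--             "description": "Implement additional integrity checks for on-chain data",
--             "importance": "high"
--         }),
--         ("ac-", {
--             "category": "Access Management",
--             "description": "Review and strengthen access control mechanisms in the contract",
--             "importance": "medium"
--         }),
--     ]
--     matched = set()
--     for cm in control_mappings:
--         cid = cm["control_id"]
--         for prefix, _ in table:
--             if cid.startswith(prefix):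
--                 matched.add(prefix)
--     recommendations = [rec for prefix, rec in table if prefix in matched]
--     if not recommendations:
--         recommendations.append({
--             "category": "General Security",
--             "description": "Conduct comprehensive security review of the smart contract",
--             "importance": "medium"
--         })
--     return recommendations
-- ===== Notes on version B (the rewrite author's own statement) =====
-- stated objective: alternative
-- what changed: Replaced the four separate any()-scans and the four hard-coded append branches by an ordered (prefix, recommendation) table: a single pass over control_mappings collects matched prefixes into a set, and the output is the table filtered by that set (default appended if empty).
import Mathlib
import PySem

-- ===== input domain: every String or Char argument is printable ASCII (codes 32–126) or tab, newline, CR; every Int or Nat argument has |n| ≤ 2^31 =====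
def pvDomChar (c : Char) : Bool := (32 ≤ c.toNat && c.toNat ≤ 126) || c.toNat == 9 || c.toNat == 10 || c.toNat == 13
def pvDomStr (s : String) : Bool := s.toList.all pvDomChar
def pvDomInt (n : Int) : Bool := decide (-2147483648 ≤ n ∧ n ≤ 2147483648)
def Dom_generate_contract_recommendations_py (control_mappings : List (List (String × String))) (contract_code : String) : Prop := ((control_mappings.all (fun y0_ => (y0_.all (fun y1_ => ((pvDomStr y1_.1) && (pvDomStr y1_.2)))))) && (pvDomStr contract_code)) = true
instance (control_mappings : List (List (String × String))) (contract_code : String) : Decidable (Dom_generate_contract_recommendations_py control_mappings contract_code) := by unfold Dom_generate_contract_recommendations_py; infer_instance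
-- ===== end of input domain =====

-- B replaces A's four any()-scans and four append branches by an ordered (prefix, recommendation)
-- table: one pass collects matched prefixes into a set, then the table is filtered (objective: alternative).

-- cm["control_id"]: first-match association-list lookup (Python dict). Under Pre_ the key is
-- always present, so the `""` default is never taken; where it is missing Python raises KeyError.
def pvCid (cm : List (String × String)) : String :=
  ((cm.find? (fun kv => kv.1 == "control_id")).map Prod.snd).getD ""

def pvRecSR : List (String × String) :=
  [("category", "Supply Chain Security"),
   ("description", "Implement supply chain integrity verification in the smart contract"),
   ("importance", "high")]
def pvRecSC : List (String × String) :=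
  [("category", "Cryptographic Controls"),
   ("description", "Ensure cryptographic mechanisms are properly implemented and validated"),
   ("importance", "high")]
def pvRecSI : List (String × String) :=
  [("category", "Data Integrity"),
   ("description", "Implement additional integrity checks for on-chain data"),
   ("importance", "high")]
def pvRecAC : List (String × String) :=
  [("category", "Access Management"),
   ("description", "Review and strengthen access control mechanisms in the contract"),
   ("importance", "medium")]
def pvRecGen : List (String × String) :=
  [("category", "General Security"),
   ("description", "Conduct comprehensive security review of the smart contract"),
   ("importance", "medium")]

-- ===== PORT A =====
def generate_contract_recommendations_py (control_mappings : List (List (String × String))) (contract_code : String) : List (List (String × String)) :=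
  let has_supply_chain := control_mappings.any (fun cm => PySem.Str.startswith (pvCid cm) "sr-")
  let has_crypto := control_mappings.any (fun cm => PySem.Str.startswith (pvCid cm) "sc-")
  let has_integrity := control_mappings.any (fun cm => PySem.Str.startswith (pvCid cm) "si-")
  let has_access_control := control_mappings.any (fun cm => PySem.Str.startswith (pvCid cm) "ac-")
  let recommendations : List (List (String × String)) := []
  let recommendations := if has_supply_chain then recommendations ++ [pvRecSR] else recommendations
  let recommendations := if has_crypto then recommendations ++ [pvRecSC] else recommendations
  let recommendations := if has_integrity then recommendations ++ [pvRecSI] else recommendations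
  let recommendations := if has_access_control then recommendations ++ [pvRecAC] else recommendations
  let recommendations := if recommendations.isEmpty then recommendations ++ [pvRecGen] else recommendations
  recommendations

-- ===== PORT B =====
def pvTable : List (String × List (String × String)) :=
  [("sr-", pvRecSR), ("sc-", pvRecSC), ("si-", pvRecSI), ("ac-", pvRecAC)]

def generate_contract_recommendations_py_alt (control_mappings : List (List (String × String))) (contract_code : String) : List (List (String × String)) :=
  let matched : PySem.Set String :=
    control_mappings.foldl
      (fun s cm =>
        pvTable.foldl
          (fun s2 pr => if PySem.Str.startswith (pvCid cm) pr.1 then PySem.Set.add s2 pr.1 else s2)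
          s)
      PySem.Set.empty
  let recommendations := (pvTable.filter (fun pr => PySem.Set.contains matched pr.1)).map Prod.snd
  if recommendations.isEmpty then recommendations ++ [pvRecGen] else recommendations

-- ===== PRECONDITION & SPEC =====
-- Pre_ excludes exactly the inputs where some mapping lacks the "control_id" key, on which
-- Python A (and B) raise KeyError.
def Pre_generate_contract_recommendations_py (control_mappings : List (List (String × String))) (contract_code : String) : Prop :=
  control_mappings.all (fun cm => cm.any (fun kv => kv.1 == "control_id")) = true
instance (control_mappings : List (List (String × String))) (contract_code : String) : Decidable (Pre_generate_contract_recommendations_py control_mappings contract_code) := by unfold Pre_generate_contract_recommendations_py; infer_instance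

def pvWitness_generate_contract_recommendations_py : (List (List (String × String))) × String :=
  ([[("control_id", "sr-1")]], "contract X {}")

def Spec_generate_contract_recommendations_py (control_mappings : List (List (String × String))) (contract_code : String) (out : List (List (String × String))) : Prop := out = generate_contract_recommendations_py_alt control_mappings contract_code
instance (control_mappings : List (List (String × String))) (contract_code : String) (out : List (List (String × String))) : Decidable (Spec_generate_contract_recommendations_py control_mappings contract_code out) := by unfold Spec_generate_contract_recommendations_py; infer_instance

-- ===== CLAIM (what is proved, stated in full; the proofs are below) =====
def Claim_equal_generate_contract_recommendations_py : Prop := ∀ (control_mappings : List (List (String × String))) (contract_code : String), Dom_generate_contract_recommendations_py control_mappings contract_code → Pre_generate_contract_recommendations_py control_mappings contract_code → Spec_generate_contract_recommendations_py control_mappings contract_code (generate_contract_recommendations_py control_mappings contract_code)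

-- ===== LEMMAS AND PROOFS =====

theorem pv_mem_condAdd (s : PySem.Set String) (cm : List (String × String)) (p q : String) :
    q ∈ (if PySem.Str.startswith (pvCid cm) p then PySem.Set.add s p else s)
      ↔ q ∈ s ∨ (q = p ∧ PySem.Str.startswith (pvCid cm) q = true) := by
  split_ifs with h
  · rw [PySem.Set.mem_add]
    constructor
    · rintro (hs | rfl)
      · exact Or.inl hs
      · exact Or.inr ⟨rfl, h⟩
    · rintro (hs | ⟨rfl, _⟩)
      · exact Or.inl hs
      · exact Or.inr rfl
  · constructor
    · exact Or.inl
    · rintro (hs | ⟨rfl, hsw⟩)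
      · exact hs
      · exact absurd hsw h

theorem pv_mem_step (s : PySem.Set String) (cm : List (String × String)) (q : String) :
    q ∈ pvTable.foldl
          (fun s2 pr => if PySem.Str.startswith (pvCid cm) pr.1 then PySem.Set.add s2 pr.1 else s2)
          s
      ↔ q ∈ s ∨ ((q = "sr-" ∨ q = "sc-" ∨ q = "si-" ∨ q = "ac-")
                  ∧ PySem.Str.startswith (pvCid cm) q = true) := by
  simp only [pvTable, List.foldl]
  rw [pv_mem_condAdd, pv_mem_condAdd, pv_mem_condAdd, pv_mem_condAdd]
  tauto

theorem pv_mem_fold (cms : List (List (String × String))) (s : PySem.Set String) (q : String) :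
    q ∈ cms.foldl
          (fun s cm =>
            pvTable.foldl
              (fun s2 pr => if PySem.Str.startswith (pvCid cm) pr.1 then PySem.Set.add s2 pr.1 else s2)
              s)
          s
      ↔ q ∈ s ∨ ((q = "sr-" ∨ q = "sc-" ∨ q = "si-" ∨ q = "ac-")
                  ∧ cms.any (fun cm => PySem.Str.startswith (pvCid cm) q) = true) := by
  induction cms generalizing s with
  | nil => simp
  | cons cm rest ih =>
      rw [List.foldl_cons, ih, pv_mem_step, List.any_cons]
      simp only [Bool.or_eq_true]
      tauto

theorem pv_contains_fold (cms : List (List (String × String))) (q : String)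
    (hq : q = "sr-" ∨ q = "sc-" ∨ q = "si-" ∨ q = "ac-") :
    PySem.Set.contains
      (cms.foldl
        (fun s cm =>
          pvTable.foldl
            (fun s2 pr => if PySem.Str.startswith (pvCid cm) pr.1 then PySem.Set.add s2 pr.1 else s2)
            s)
        PySem.Set.empty) q
      = cms.any (fun cm => PySem.Str.startswith (pvCid cm) q) := by
  cases hb : cms.any (fun cm => PySem.Str.startswith (pvCid cm) q) with
  | true =>
      exact (PySem.Set.contains_iff _ _).mpr
        ((pv_mem_fold cms PySem.Set.empty q).mpr (Or.inr ⟨hq, hb⟩))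
  | false =>
      rw [Bool.eq_false_iff]
      intro hc
      have hm := (pv_mem_fold cms PySem.Set.empty q).mp ((PySem.Set.contains_iff _ _).mp hc)
      have hx := hm.resolve_left (by simp [PySem.Set.empty])
      rw [hx.2] at hb
      exact Bool.noConfusion hb

-- ===== VERDICT (by name: the statement is the Claim_ definition above) =====
set_option maxHeartbeats 1000000 in
theorem generate_contract_recommendations_py_spec : Claim_equal_generate_contract_recommendations_py := by
  intro cms code _ _
  unfold Spec_generate_contract_recommendations_py
  unfold generate_contract_recommendations_py generate_contract_recommendations_py_alt
  have h1 := pv_contains_fold cms "sr-" (by tauto)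
  have h2 := pv_contains_fold cms "sc-" (by tauto)
  have h3 := pv_contains_fold cms "si-" (by tauto)
  have h4 := pv_contains_fold cms "ac-" (by tauto)
  simp only [pvTable, List.filter_cons, List.filter_nil]
  simp only [pvTable] at h1 h2 h3 h4
  rw [h1, h2, h3, h4]
  cases cms.any (fun cm => PySem.Str.startswith (pvCid cm) "sr-") <;>
  cases cms.any (fun cm => PySem.Str.startswith (pvCid cm) "sc-") <;>
  cases cms.any (fun cm => PySem.Str.startswith (pvCid cm) "si-") <;>
  cases cms.any (fun cm => PySem.Str.startswith (pvCid cm) "ac-") <;>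
  rfl
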